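-- pv_equiv track=rewrite | github.com/daniesky/debruijn_denovo_mf | src/result_analysis.py | align_best_fit
-- ===== SOURCE A (Python) =====
-- def align_best_fit(sequence, pattern):
--     if len(pattern) > len(sequence):
--         raise ValueError("Pattern length cannot be greater than sequence length.")
--
--     best_score = -1
--     best_position = 0
--
--     seq_len = len(sequence)
--     pat_len = len(pattern)
--
--     for i in range(seq_len - pat_len + 1):
--         segment = sequence[i:i + pat_len]
--         score = sum(1 for a, b in zip(segment, pattern) if a == b)
--
--         if score > best_score:
--             best_score = score
--             best_position = i
--
--     # Create alignment visualization
--     alignment = ["-"] * len(sequence)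
--     alignment[best_position:best_position + pat_len] = pattern
--     return best_position, best_score
-- ===== SOURCE B (Python) =====
-- def _first_at_least(js, x):
--     # index of the first element >= x in the sorted list js (hand-rolled bisect_left)
--     lo = 0
--     hi = len(js)
--     while lo < hi:
--         mid = (lo + hi) // 2
--         if js[mid] < x:
--             lo = mid + 1
--         else:
--             hi = mid
--     return lo
--
--
-- def align_best_fit(sequence, pattern):
--     n = len(sequence)
--     m = len(pattern)
--     if m > n:
--         raise ValueError("Pattern length cannot be greater than sequence length.")
--     L = n - m
--     # inverted index: pattern character -> sorted list of positions where it occurs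
--     idx = {}
--     for j, c in enumerate(pattern):
--         idx.setdefault(c, []).append(j)
--     # count matches per offset; for each sequence position touch only the pattern
--     # positions of the same character whose offset k - j lands in [0, L]
--     hits = {}
--     for k, c in enumerate(sequence):
--         js = idx.get(c, ())
--         lo = _first_at_least(js, k - L)
--         hi = _first_at_least(js, k + 1)
--         for j in js[lo:hi]:
--             hits[k - j] = hits.get(k - j, 0) + 1
--     best_score = -1
--     best_position = 0
--     for i in range(L + 1):
--         sc = hits.get(i, 0)
--         if sc > best_score:
--             best_score = sc
--             best_position = i
--     return best_position, best_score
-- ===== Notes on version B (the rewrite author's own statement) =====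
-- stated objective: alternative
-- what changed: Instead of slicing the sequence at every offset and counting matches pairwise, B builds an inverted index of pattern positions per character, uses a hand-rolled binary search to keep only positions whose offset is valid, counts just the matching character pairs into a dict of per-offset scores, and scans the offsets once for the first maximum.
import Mathlib
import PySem

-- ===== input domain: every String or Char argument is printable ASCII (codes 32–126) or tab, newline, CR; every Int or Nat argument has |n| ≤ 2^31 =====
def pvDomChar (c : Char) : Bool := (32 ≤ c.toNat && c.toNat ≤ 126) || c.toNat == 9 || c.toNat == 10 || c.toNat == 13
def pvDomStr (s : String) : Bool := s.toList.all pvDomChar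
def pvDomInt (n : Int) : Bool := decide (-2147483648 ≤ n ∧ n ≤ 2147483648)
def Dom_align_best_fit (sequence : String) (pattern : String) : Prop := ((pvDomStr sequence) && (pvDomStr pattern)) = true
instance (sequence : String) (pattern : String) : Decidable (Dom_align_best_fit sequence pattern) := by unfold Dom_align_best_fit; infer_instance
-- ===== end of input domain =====

-- B replaces A's per-offset slice-and-count scan by an inverted index over the pattern:
-- only matching (sequence,pattern) character pairs are counted (into a dict of offsets),
-- then one scan picks the first maximal offset.


-- ===== PORT A =====
-- literal port of A; the initial 'raise' branch (len(pattern) > len(sequence)) is excluded by Pre_;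
-- the dead 'alignment' visualization list does not affect the return value and is not built.
def align_best_fit (sequence : String) (pattern : String) : Int × Int :=
  let s := sequence.toList
  let p := pattern.toList
  let seqLen : Int := (s.length : Int)
  let patLen : Int := (p.length : Int)
  let st :=
    (PySem.List.pyRange 0 (seqLen - patLen + 1) 1).foldl
      (fun (st : Int × Int) (i : Int) =>
        let segment := PySem.List.slice s (some i) (some (i + patLen))
        let score : Int := (segment.zip p).foldl (fun acc ab => if ab.1 == ab.2 then acc + 1 else acc) 0
        if score > st.1 then (score, i) else st)
      (-1, 0)
  (st.2, st.1)

-- ===== PORT B =====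
-- termination fact for the hand-rolled bisect loop in B (cited by decreasing_by)
theorem pvMid_bounds (lo hi : Int) (h : lo < hi) :
    lo ≤ PySem.Int.floordiv (lo + hi) 2 ∧ PySem.Int.floordiv (lo + hi) 2 < hi := by
  have h1 := PySem.Int.floordiv_two_mid_bounds (le_of_lt h)
  have h2 : PySem.Int.floordiv (lo + hi) 2 < hi := by
    rw [PySem.Int.floordiv_lt_iff_lt_mul (by omega : (0:Int) < 2)]
    omega
  exact ⟨h1.1, h2⟩

-- literal port of Source B's _first_at_least (its while loop as recursion on hi - lo);
-- js[mid] is always in range here, so pyGetD with a dummy default is exact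
def pvFirstAtLeastGo (js : List Int) (x : Int) (lo hi : Int) : Int :=
  if h : lo < hi then
    let mid := PySem.Int.floordiv (lo + hi) 2
    if PySem.List.pyGetD js mid 0 < x then
      pvFirstAtLeastGo js x (mid + 1) hi
    else
      pvFirstAtLeastGo js x lo mid
  else lo
termination_by (hi - lo).toNat
decreasing_by
  · have := pvMid_bounds lo hi h; omega
  · have := pvMid_bounds lo hi h; omega

def pvFirstAtLeast (js : List Int) (x : Int) : Int :=
  pvFirstAtLeastGo js x 0 (js.length : Int)

-- literal port of Source B; the same 'raise' branch is excluded by Pre_.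
def align_best_fit_alt (sequence : String) (pattern : String) : Int × Int :=
  let s := sequence.toList
  let p := pattern.toList
  let n : Int := (s.length : Int)
  let m : Int := (p.length : Int)
  let L : Int := n - m
  -- idx: pattern char -> sorted list of positions (idx.setdefault(c, []).append(j))
  let idx : PySem.Dict Char (List Int) :=
    (PySem.List.enumerate p 0).foldl (fun d jc => d.modify jc.2 [] (fun l => l ++ [jc.1])) PySem.Dict.empty
  -- hits: offset -> number of matching character pairs at that offset
  let hits : PySem.Dict Int Int :=
    (PySem.List.enumerate s 0).foldl
      (fun h kc =>
        let js := idx.getD kc.2 []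
        let lo := pvFirstAtLeast js (kc.1 - L)
        let hi := pvFirstAtLeast js (kc.1 + 1)
        (PySem.List.slice js (some lo) (some hi)).foldl
          (fun h j => h.insert (kc.1 - j) (h.getD (kc.1 - j) 0 + 1)) h)
      PySem.Dict.empty
  let st :=
    (PySem.List.pyRange 0 (L + 1) 1).foldl
      (fun (st : Int × Int) (i : Int) =>
        let sc := hits.getD i 0
        if sc > st.1 then (sc, i) else st)
      (-1, 0)
  (st.2, st.1)

-- ===== PRECONDITION & SPEC =====
-- Pre_ excludes exactly the inputs where A raises ValueError (pattern longer than sequence).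
def Pre_align_best_fit (sequence : String) (pattern : String) : Prop :=
  pattern.toList.length ≤ sequence.toList.length
instance (sequence : String) (pattern : String) : Decidable (Pre_align_best_fit sequence pattern) := by
  unfold Pre_align_best_fit; infer_instance

def pvWitness_align_best_fit : String × String := ("abcab", "ab")

def Spec_align_best_fit (sequence : String) (pattern : String) (out : Int × Int) : Prop := out = align_best_fit_alt sequence pattern
instance (sequence : String) (pattern : String) (out : Int × Int) : Decidable (Spec_align_best_fit sequence pattern out) := by unfold Spec_align_best_fit; infer_instance

-- ===== CLAIM (what is proved, stated in full; the proofs are below) =====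
def Claim_equal_align_best_fit : Prop := ∀ (sequence : String) (pattern : String), Dom_align_best_fit sequence pattern → Pre_align_best_fit sequence pattern → Spec_align_best_fit sequence pattern (align_best_fit sequence pattern)

-- ===== LEMMAS AND PROOFS =====

-- the match score both programs compute at offset i, as a count over pattern indices
def pvScore (s p : List Char) (i : Nat) : Nat :=
  (List.range p.length).countP (fun j => decide (s[i + j]? = p[j]?))

-- A's zip-count over a window equals the index count
theorem pv_countP_zip_range (u p : List Char) (h : p.length ≤ u.length) :
    (u.zip p).countP (fun ab => ab.1 == ab.2)
      = (List.range p.length).countP (fun j => decide (u[j]? = p[j]?)) := by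
  induction p generalizing u with
  | nil => simp
  | cons b p' ih =>
    cases u with
    | nil => simp at h
    | cons a u' =>
      simp only [List.zip_cons_cons, List.countP_cons, List.length_cons,
        List.range_succ_eq_map, List.countP_map]
      rw [ih u' (by simpa using h)]
      rw [show List.countP ((fun j => decide ((a :: u')[j]? = (b :: p')[j]?)) ∘ Nat.succ)
            (List.range p'.length)
          = List.countP (fun j => decide (u'[j]? = p'[j]?)) (List.range p'.length) from
        List.countP_congr (fun x _ => by simp)]
      have hd : (a == b) = decide ((some a : Option Char) = some b) := by
        simp [Bool.beq_eq_decide_eq]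
      rw [hd]
      simp

-- A's inner loop computes pvScore
theorem pv_A_score (s p : List Char) (i : Int) (h0 : 0 ≤ i) (h1 : i ≤ (s.length : Int) - p.length) :
    ((PySem.List.slice s (some i) (some (i + (p.length : Int)))).zip p).foldl
        (fun acc ab => if ab.1 == ab.2 then acc + 1 else acc) (0 : Int)
      = (pvScore s p i.toNat : Int) := by
  rw [PySem.List.foldl_count_if, PySem.List.slice_toNat s h0 (by omega)]
  have hm : (i + (p.length : Int)).toNat - i.toNat = p.length := by omega
  rw [hm]
  rw [pv_countP_zip_range _ p (by simp [List.length_take, List.length_drop]; omega)]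
  have hpt : ∀ j ∈ List.range p.length,
      (decide ((List.take p.length (List.drop i.toNat s))[j]? = p[j]?))
        = decide (s[i.toNat + j]? = p[j]?) := by
    intro j hj
    simp only [List.mem_range] at hj
    rw [List.getElem?_take_of_lt hj, List.getElem?_drop]
  rw [List.countP_congr (fun x hx => by rw [hpt x hx])]
  simp [pvScore]

-- the inverted index holds exactly the positions of c in p, in order
theorem pv_idx_getD (p : List Char) (c : Char) :
    ((PySem.List.enumerate p 0).foldl (fun d jc => d.modify jc.2 [] (fun l => l ++ [jc.1]))
        PySem.Dict.empty).getD c []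
      = ((PySem.List.enumerate p 0).filter (fun jc => jc.2 == c)).map (·.1) := by
  have h1 : (PySem.List.enumerate p 0).foldl
        (fun d jc => d.modify jc.2 [] (fun l => l ++ [jc.1])) (PySem.Dict.empty : PySem.Dict Char (List Int))
      = ((PySem.List.enumerate p 0).map (fun jc => (jc.2, jc.1))).foldl
        (fun d q => d.modify q.1 [] (fun l => l ++ [q.2])) PySem.Dict.empty := by
    rw [List.foldl_map]
  rw [h1, PySem.Dict.getD_foldl_modify_append]
  simp [List.filter_map]
  rfl

-- counting one value among the positions of c in p
theorem pv_count_positions (p : List Char) (t v : Int) (c : Char) :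
    (((PySem.List.enumerate p t).filter (fun jc => jc.2 == c)).map (·.1)).count v
      = if 0 ≤ v - t ∧ (v - t).toNat < p.length ∧ p[(v - t).toNat]? = some c then 1 else 0 := by
  induction p generalizing t with
  | nil => simp
  | cons a p' ih =>
    rw [PySem.List.enumerate_cons]
    rcases lt_trichotomy v t with hv | hv | hv
    · -- v < t : everything is 0
      have hrhs : ¬ (0 ≤ v - t ∧ (v - t).toNat < (a :: p').length ∧ (a :: p')[(v - t).toNat]? = some c) := by
        intro h; omega
      rw [if_neg hrhs]
      by_cases hac : a == c
      · simp only [List.filter_cons, hac, if_pos, List.map_cons, List.count_cons]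
        rw [ih (t+1)]
        have hn : ¬ (0 ≤ v - (t+1) ∧ (v - (t+1)).toNat < p'.length ∧ p'[(v - (t+1)).toNat]? = some c) := by
          intro h; omega
        rw [if_neg hn]
        simp; omega
      · simp only [List.filter_cons, hac]
        simp only [Bool.false_eq_true, if_false]
        rw [ih (t+1)]
        have hn : ¬ (0 ≤ v - (t+1) ∧ (v - (t+1)).toNat < p'.length ∧ p'[(v - (t+1)).toNat]? = some c) := by
          intro h; omega
        rw [if_neg hn]
    · -- v = t : only the head can count
      subst hv
      have hz : (v - v).toNat = 0 := by omega
      have htail : ¬ (0 ≤ v - (v+1) ∧ (v - (v+1)).toNat < p'.length ∧ p'[(v - (v+1)).toNat]? = some c) := by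
        intro h; omega
      by_cases hac : a == c
      · have hrhs : (0 ≤ v - v ∧ (v - v).toNat < (a :: p').length ∧ (a :: p')[(v - v).toNat]? = some c) := by
          refine ⟨by omega, by simp, ?_⟩
          rw [hz]; simpa using (eq_of_beq hac)
        rw [if_pos hrhs]
        simp only [List.filter_cons, hac, if_pos, List.map_cons, List.count_cons]
        rw [ih (v+1), if_neg htail]
        simp
      · have hrhs : ¬ (0 ≤ v - v ∧ (v - v).toNat < (a :: p').length ∧ (a :: p')[(v - v).toNat]? = some c) := by
          rw [hz]
          intro ⟨_, _, h3⟩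
          simp at h3
          exact hac (by simp [h3])
        rw [if_neg hrhs]
        simp only [List.filter_cons, hac]
        simp only [Bool.false_eq_true, if_false]
        rw [ih (v+1), if_neg htail]
    · -- t < v : head never counts; shift into the tail
      have hsh : (v - t).toNat = (v - (t+1)).toNat + 1 := by omega
      have hidx : (a :: p')[(v - t).toNat]? = p'[(v - (t+1)).toNat]? := by
        rw [hsh, List.getElem?_cons_succ]
      have hcond : (0 ≤ v - t ∧ (v - t).toNat < (a :: p').length ∧ (a :: p')[(v - t).toNat]? = some c)
          ↔ (0 ≤ v - (t+1) ∧ (v - (t+1)).toNat < p'.length ∧ p'[(v - (t+1)).toNat]? = some c) := by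
        rw [hidx]
        constructor
        · intro ⟨h1, h2, h3⟩; exact ⟨by omega, by simp at h2; omega, h3⟩
        · intro ⟨h1, h2, h3⟩; exact ⟨by omega, by simp; omega, h3⟩
      rw [if_congr hcond rfl rfl, ← ih (t+1)]
      by_cases hac : a == c
      · simp only [List.filter_cons, hac, if_pos, List.map_cons, List.count_cons]
        simp; omega
      · simp only [List.filter_cons, hac]
        simp only [Bool.false_eq_true, if_false]

-- the index-shift over the plain range
theorem pv_range_shift (s p : List Char) (iN : Nat) (h : iN + p.length ≤ s.length) :
    (List.range s.length).countP
        (fun k => decide (iN ≤ k ∧ k - iN < p.length ∧ p[k - iN]? = s[k]?))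
      = pvScore s p iN := by
  have hsplit : s.length = (iN + p.length) + (s.length - iN - p.length) := by omega
  rw [show List.range s.length
      = List.range (iN + p.length) ++ (List.range (s.length - iN - p.length)).map ((iN + p.length) + ·) from by
    rw [← List.range_add, ← hsplit]]
  rw [List.range_add, List.countP_append, List.countP_append, List.countP_map, List.countP_map]
  have h1 : (List.range iN).countP (fun k => decide (iN ≤ k ∧ k - iN < p.length ∧ p[k - iN]? = s[k]?)) = 0 := by
    rw [List.countP_eq_zero]
    intro k hk
    simp only [List.mem_range] at hk
    simp only [decide_eq_true_eq]
    intro ⟨h1, _, _⟩; omega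
  have h3 : (List.range (s.length - iN - p.length)).countP
      ((fun k => decide (iN ≤ k ∧ k - iN < p.length ∧ p[k - iN]? = s[k]?)) ∘ ((iN + p.length) + ·)) = 0 := by
    rw [List.countP_eq_zero]
    intro k _
    simp only [Function.comp, decide_eq_true_eq]
    intro ⟨_, h2, _⟩; omega
  rw [h1, h3]
  simp only [Nat.zero_add, Nat.add_zero]
  apply List.countP_congr
  intro j hj
  simp only [List.mem_range] at hj
  simp only [Function.comp, decide_eq_true_eq]
  constructor
  · intro ⟨_, _, h3'⟩
    have hji : iN + j - iN = j := by omega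
    rw [hji] at h3'
    exact (by rw [h3'])
  · intro hh
    refine ⟨by omega, by omega, ?_⟩
    have hji : iN + j - iN = j := by omega
    rw [hji, hh]

-- counting matching (k, s[k]) pairs over the enumerated sequence equals pvScore
theorem pv_count_enumerate (s p : List Char) (iN : Nat) (h : iN + p.length ≤ s.length) :
    (PySem.List.enumerate s 0).countP
        (fun kc => decide (0 ≤ kc.1 - (iN : Int) ∧ (kc.1 - (iN : Int)).toNat < p.length ∧
          p[(kc.1 - (iN : Int)).toNat]? = some kc.2))
      = pvScore s p iN := by
  rw [PySem.List.enumerate_eq_map_pyRange s 'a', List.countP_map,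
      PySem.List.pyRange_zero, List.countP_map]
  rw [← pv_range_shift s p iN h]
  apply List.countP_congr
  intro k hk
  simp only [List.mem_range, PySem.List.len] at hk ⊢
  simp only [Function.comp, decide_eq_true_eq]
  have hget : PySem.List.pyGetD s (k : Int) 'a' = s.getD k 'a' := by
    simp [PySem.List.pyGetD_natCast]
  have hsk : s[k]? = some (s.getD k 'a') := by
    rw [List.getD_eq_getElem?_getD, List.getElem?_eq_getElem (by omega)]
    simp
  constructor
  · intro ⟨h1, h2, h3⟩
    refine ⟨by omega, by omega, ?_⟩
    have hkk : ((k : Int) - iN).toNat = k - iN := by omega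
    rw [hkk] at h3
    rw [h3, hget, hsk]
  · intro ⟨h1, h2, h3⟩
    refine ⟨by omega, by rw [show ((k:Int) - iN).toNat = k - iN from by omega]; omega, ?_⟩
    rw [show ((k:Int) - iN).toNat = k - iN from by omega, h3, hget, hsk]

-- count distributes over flatMap (no such lemma found in Mathlib/PySem)
theorem pv_count_flatMap {A : Type} (l : List A) (g : A → List Int) (v : Int) :
    (l.flatMap g).count v = (l.map (fun x => (g x).count v)).sum := by
  induction l with
  | nil => simp
  | cons x xs ih => simp [List.count_append, ih]

-- correctness of the hand-rolled bisect and the window it selects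
theorem pvFirstAtLeastGo_spec (js : List Int) (x : Int) (lo hi : Int)
    (hs : js.Pairwise (· ≤ ·))
    (h0 : 0 ≤ lo) (hlh : lo ≤ hi) (hhi : hi ≤ (js.length : Int))
    (hlow : ∀ t : Nat, (ht : t < js.length) → (t : Int) < lo → js[t] < x)
    (hhigh : ∀ t : Nat, (ht : t < js.length) → hi ≤ (t : Int) → x ≤ js[t]) :
    0 ≤ pvFirstAtLeastGo js x lo hi ∧ pvFirstAtLeastGo js x lo hi ≤ (js.length : Int) ∧
      (∀ t : Nat, (ht : t < js.length) → (t : Int) < pvFirstAtLeastGo js x lo hi → js[t] < x) ∧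
      (∀ t : Nat, (ht : t < js.length) → pvFirstAtLeastGo js x lo hi ≤ (t : Int) → x ≤ js[t]) := by
  induction lo, hi using pvFirstAtLeastGo.induct js x with
  | case1 lo hi h mid hm ih =>
    rw [pvFirstAtLeastGo, dif_pos h, if_pos (by exact hm)]
    have hmb := pvMid_bounds lo hi h
    have hmlt : mid.toNat < js.length := by omega
    have hmget : PySem.List.pyGetD js mid 0 = js[mid.toNat] := by
      rw [PySem.List.pyGetD_eq_getElem _ _ (by omega) (by omega)]
    apply ih (by omega) (by omega) hhi
    · intro t ht htlt
      rcases Nat.lt_or_ge t mid.toNat with hc | hc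
      · have := (List.pairwise_iff_getElem.mp hs) t mid.toNat ht hmlt hc
        rw [hmget] at hm
        omega
      · have : t = mid.toNat := by omega
        subst this
        rw [← hmget]; exact hm
    · exact hhigh
  | case2 lo hi h mid hm ih =>
    rw [pvFirstAtLeastGo, dif_pos h, if_neg (by exact hm)]
    have hmb := pvMid_bounds lo hi h
    have hmlt : mid.toNat < js.length := by omega
    have hmget : PySem.List.pyGetD js mid 0 = js[mid.toNat] := by
      rw [PySem.List.pyGetD_eq_getElem _ _ (by omega) (by omega)]
    apply ih h0 (by omega) (by omega) hlow
    intro t ht hmt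
    rcases Nat.lt_or_ge mid.toNat t with hc | hc
    · have := (List.pairwise_iff_getElem.mp hs) mid.toNat t hmlt ht hc
      rw [hmget] at hm
      omega
    · have : t = mid.toNat := by omega
      subst this
      rw [← hmget]; omega
  | case3 lo hi h =>
    rw [pvFirstAtLeastGo, dif_neg h]
    exact ⟨h0, by omega, fun t ht hlt => hlow t ht hlt, fun t ht hle => hhigh t ht (by omega)⟩

theorem pvFirstAtLeast_spec (js : List Int) (x : Int) (hs : js.Pairwise (· ≤ ·)) :
    0 ≤ pvFirstAtLeast js x ∧ pvFirstAtLeast js x ≤ (js.length : Int) ∧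
      (∀ t : Nat, (ht : t < js.length) → (t : Int) < pvFirstAtLeast js x → js[t] < x) ∧
      (∀ t : Nat, (ht : t < js.length) → pvFirstAtLeast js x ≤ (t : Int) → x ≤ js[t]) := by
  exact pvFirstAtLeastGo_spec js x 0 (js.length) hs (by omega) (by omega) (by omega)
    (by intro t ht h; omega) (by intro t ht h; omega)

theorem pv_window_count (js : List Int) (hs : js.Pairwise (· ≤ ·)) (x1 x2 v : Int)
    (hv1 : x1 ≤ v) (hv2 : v < x2) :
    (PySem.List.slice js (some (pvFirstAtLeast js x1)) (some (pvFirstAtLeast js x2))).count v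
      = js.count v := by
  obtain ⟨h10, h1len, h1low, h1high⟩ := pvFirstAtLeast_spec js x1 hs
  obtain ⟨h20, h2len, h2low, h2high⟩ := pvFirstAtLeast_spec js x2 hs
  set r1 := pvFirstAtLeast js x1
  set r2 := pvFirstAtLeast js x2
  have hr12 : r1 ≤ r2 := by
    by_contra hcon
    have h1 : r2 < r1 := by omega
    have h2 : r2.toNat < js.length := by omega
    have := h2high r2.toNat h2 (by omega)
    have := h1low r2.toNat h2 (by omega)
    omega
  rw [PySem.List.slice_toNat js h10 h20]
  have hdecomp : js = js.take r1.toNat ++ ((js.drop r1.toNat).take (r2.toNat - r1.toNat) ++ js.drop r2.toNat) := by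
    rw [show js.drop r2.toNat = (js.drop r1.toNat).drop (r2.toNat - r1.toNat) from by
      rw [List.drop_drop]; congr 1; omega]
    rw [List.take_append_drop, List.take_append_drop]
  have hc1 : (js.take r1.toNat).count v = 0 := by
    rw [List.count_eq_zero]
    intro he
    obtain ⟨t, ht, rfl⟩ := List.getElem_of_mem he
    have ht' : t < js.length := by
      have := List.length_take_le r1.toNat js; omega
    rw [List.getElem_take] at hv1
    have : js[t] < x1 := h1low t ht' (by simp at ht; omega)
    omega
  have hc3 : (js.drop r2.toNat).count v = 0 := by
    rw [List.count_eq_zero]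
    intro he
    obtain ⟨t, ht, rfl⟩ := List.getElem_of_mem he
    rw [List.getElem_drop] at hv2
    have ht' : r2.toNat + t < js.length := by simp at ht; omega
    have : x2 ≤ js[r2.toNat + t] := h2high _ ht' (by omega)
    omega
  conv_rhs => rw [hdecomp]
  rw [List.count_append, List.count_append, hc1, hc3]
  omega

-- the position lists stored in idx are sorted
theorem pv_positions_sorted (p : List Char) (c : Char) :
    ((((PySem.List.enumerate p 0).filter (fun jc => jc.2 == c)).map (·.1)) : List Int).Pairwise (· ≤ ·) := by
  have h := PySem.List.pairwise_lt_enumerate (xs := p) (s := 0)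
  exact ((h.filter _).map _ (fun a b hab => le_of_lt hab))

-- B's hits dict evaluates to pvScore at every admissible offset
theorem pv_B_score (s p : List Char) (i : Int)
    (h0 : 0 ≤ i) (h1 : i ≤ (s.length : Int) - (p.length : Int)) :
    (((PySem.List.enumerate s 0).foldl
        (fun h kc =>
          let js := (((PySem.List.enumerate p 0).foldl
              (fun d jc => d.modify jc.2 [] (fun l => l ++ [jc.1])) PySem.Dict.empty)).getD kc.2 []
          let lo := pvFirstAtLeast js (kc.1 - ((s.length : Int) - (p.length : Int)))
          let hi := pvFirstAtLeast js (kc.1 + 1)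
          (PySem.List.slice js (some lo) (some hi)).foldl
            (fun h j => h.insert (kc.1 - j) (h.getD (kc.1 - j) 0 + 1)) h)
        PySem.Dict.empty) : PySem.Dict Int Int).getD i 0
      = (pvScore s p i.toNat : Int) := by
  set L : Int := (s.length : Int) - (p.length : Int) with hL
  set idx := (PySem.List.enumerate p 0).foldl
      (fun d jc => d.modify jc.2 [] (fun l => l ++ [jc.1]))
      (PySem.Dict.empty : PySem.Dict Char (List Int)) with hidx
  set F : Int × Char → List Int := fun kc =>
      (PySem.List.slice (idx.getD kc.2 [])
          (some (pvFirstAtLeast (idx.getD kc.2 []) (kc.1 - L)))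
          (some (pvFirstAtLeast (idx.getD kc.2 []) (kc.1 + 1)))).map (fun j => kc.1 - j) with hF
  have houter : (PySem.List.enumerate s 0).foldl
        (fun h kc =>
          (PySem.List.slice (idx.getD kc.2 [])
              (some (pvFirstAtLeast (idx.getD kc.2 []) (kc.1 - L)))
              (some (pvFirstAtLeast (idx.getD kc.2 []) (kc.1 + 1)))).foldl
            (fun h j => h.insert (kc.1 - j) (h.getD (kc.1 - j) 0 + 1)) h)
        (PySem.Dict.empty : PySem.Dict Int Int)
      = ((PySem.List.enumerate s 0).flatMap F).foldl
          (fun h pos => h.insert pos (h.getD pos 0 + 1)) PySem.Dict.empty := by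
    rw [List.foldl_flatMap]
    apply PySem.List.foldl_congr_mem
    intro acc kc _
    rw [hF]
    rw [List.foldl_map]
  rw [houter, PySem.Dict.getD_foldl_insert_add_one, PySem.Dict.getD_empty]
  rw [pv_count_flatMap]
  have hper : ∀ kc ∈ PySem.List.enumerate s 0,
      (F kc).count i
        = if 0 ≤ kc.1 - i ∧ (kc.1 - i).toNat < p.length ∧ p[(kc.1 - i).toNat]? = some kc.2
          then 1 else 0 := by
    intro kc _
    rw [hF]
    simp only []
    have hinj : Function.Injective (fun j : Int => kc.1 - j) := by
      intro a b hab; simp at hab; omega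
    have hre : i = (fun j : Int => kc.1 - j) (kc.1 - i) := by simp
    rw [hre, List.count_map_of_injective _ _ hinj]
    have hsorted : (idx.getD kc.2 []).Pairwise (· ≤ ·) := by
      rw [hidx, pv_idx_getD]
      exact pv_positions_sorted p kc.2
    rw [pv_window_count _ hsorted _ _ _ (by omega) (by omega)]
    rw [hidx, pv_idx_getD, pv_count_positions]
    simp
  rw [List.map_congr_left hper]
  have hiN : (i.toNat : Int) = i := Int.toNat_of_nonneg h0
  have hsum : (List.map
      (fun kc => if 0 ≤ kc.1 - i ∧ (kc.1 - i).toNat < p.length ∧ p[(kc.1 - i).toNat]? = some kc.2 then 1 else 0)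
      (PySem.List.enumerate s 0)).sum
      = (PySem.List.enumerate s 0).countP
        (fun kc => decide (0 ≤ kc.1 - (i.toNat : Int) ∧ (kc.1 - (i.toNat : Int)).toNat < p.length ∧
          p[(kc.1 - (i.toNat : Int)).toNat]? = some kc.2)) := by
    rw [hiN, ← PySem.List.sum_map_ite_one_zero_nat]
    apply congrArg
    apply List.map_congr_left
    intro kc _
    simp
  rw [hsum, pv_count_enumerate s p i.toNat (by omega)]
  simp

-- ===== VERDICT (by name: the statement is the Claim_ definition above) =====
theorem align_best_fit_spec : Claim_equal_align_best_fit := by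
  intro sequence pattern _hdom hpre
  unfold Pre_align_best_fit at hpre
  unfold Spec_align_best_fit align_best_fit align_best_fit_alt
  simp only []
  refine congrArg (fun st : Int × Int => (st.2, st.1)) ?_
  apply PySem.List.foldl_congr_mem
  intro acc x hx
  rw [PySem.List.mem_pyRange_one] at hx
  rw [pv_A_score sequence.toList pattern.toList x hx.1 (by omega),
      pv_B_score sequence.toList pattern.toList x hx.1 (by omega)]
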